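-- pv_equiv track=rewrite | github.com/psobot/SampleScanner | lib/pitch.py | optimal_pitch_center
-- ===== SOURCE A (Python) =====
-- def optimal_pitch_center(step=1):
--     """Given a step size, decide where to place the pitch center.
--
--     Preference is given to extending the region downwards -- sounds better.
--     """
--     assert 0 < step < 128
--
--     def _a_generator():
--         yield False
--         yield True
--         while True:
--             yield False
--             yield False
--             yield True
--
--     answer = 0
--     a_generator = _a_generator()
--     for _ in range(step - 1):
--         if not next(a_generator):
--             answer += 1
--     return answer
-- ===== SOURCE B (Python) =====
-- def optimal_pitch_center(step=1):
--     """Given a step size, decide where to place the pitch center.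
--
--     Preference is given to extending the region downwards -- sounds better.
--     """
--     assert 0 < step < 128
--     # The generator yields True exactly at positions p with p % 3 == 1;
--     # among the first n = step - 1 positions there are (n + 1) // 3 Trues.
--     n = step - 1
--     return n - (n + 1) // 3
-- ===== Notes on version B (the rewrite author's own statement) =====
-- stated objective: faster
-- what changed: Replaced the generator-driven counting loop by a closed-form arithmetic expression (step-1) - step//3.
import Mathlib
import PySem

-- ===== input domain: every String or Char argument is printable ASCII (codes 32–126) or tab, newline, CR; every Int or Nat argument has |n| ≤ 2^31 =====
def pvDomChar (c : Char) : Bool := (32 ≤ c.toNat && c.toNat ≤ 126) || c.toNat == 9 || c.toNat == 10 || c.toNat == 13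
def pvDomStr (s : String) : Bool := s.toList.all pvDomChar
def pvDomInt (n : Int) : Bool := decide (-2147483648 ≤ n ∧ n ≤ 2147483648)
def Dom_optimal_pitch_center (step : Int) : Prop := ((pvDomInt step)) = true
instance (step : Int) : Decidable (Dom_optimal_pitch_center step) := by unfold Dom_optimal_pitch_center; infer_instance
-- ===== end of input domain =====

-- B replaces A's generator-driven counting loop by a closed-form O(1) arithmetic expression.

-- ===== PORT A =====
-- The generator's control flow as a 5-state machine: state ↦ (yielded value, next state).
-- States 0,1 are the two initial yields; 2,3,4 are the body of the infinite while loop.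
def pvGenNext (s : Nat) : Bool × Nat :=
  match s with
  | 0 => (false, 1)
  | 1 => (true, 2)
  | 2 => (false, 3)
  | 3 => (false, 4)
  | _ => (true, 2)

def optimal_pitch_center (step : Int) : Int :=
  -- for _ in range(step - 1): if not next(a_generator): answer += 1
  (PySem.List.pyRange 0 (step - 1) 1).foldl
    (fun (st : Int × Nat) _ =>
      let (v, g') := pvGenNext st.2
      if ¬ v then (st.1 + 1, g') else (st.1, g'))
    (0, 0) |>.1

-- ===== PORT B =====
def optimal_pitch_center_alt (step : Int) : Int :=
  let n := step - 1
  n - PySem.Int.floordiv (n + 1) 3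

-- ===== PRECONDITION & SPEC =====
-- A's assert: 0 < step < 128 (AssertionError otherwise).
def Pre_optimal_pitch_center (step : Int) : Prop := 0 < step ∧ step < 128
instance (step : Int) : Decidable (Pre_optimal_pitch_center step) := by unfold Pre_optimal_pitch_center; infer_instance
def pvWitness_optimal_pitch_center : Int := (6)

def Spec_optimal_pitch_center (step : Int) (out : Int) : Prop := out = optimal_pitch_center_alt step
instance (step : Int) (out : Int) : Decidable (Spec_optimal_pitch_center step out) := by unfold Spec_optimal_pitch_center; infer_instance

-- ===== CLAIM (what is proved, stated in full; the proofs are below) =====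
def Claim_equal_optimal_pitch_center : Prop := ∀ (step : Int), Dom_optimal_pitch_center step → Pre_optimal_pitch_center step → Spec_optimal_pitch_center step (optimal_pitch_center step)

-- ===== LEMMAS AND PROOFS =====

-- ===== VERDICT (by name: the statement is the Claim_ definition above) =====
theorem optimal_pitch_center_spec : Claim_equal_optimal_pitch_center := by
  intro step _ hpre
  obtain ⟨h1, h2⟩ := hpre
  unfold Spec_optimal_pitch_center
  interval_cases step <;> decide
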